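-- pv_equiv track=rewrite | github.com/cloudtik/cloudtik | python/cloudtik/runtime/redis/scripting.py | _get_master_replicas
-- ===== SOURCE A (Python) =====
-- def _get_master_replicas(master_nodes, slave_nodes):
--     master_replicas = {}
--     for node_id in master_nodes:
--         master_replicas[node_id] = set()
--
--     if not slave_nodes:
--         return master_replicas
--
--     for node_id, node_info in slave_nodes.items():
--         master_id = node_info.get("master_id")
--         if not master_id or master_id == "-":
--             continue
--         if master_id not in master_replicas:
--             master_replicas[master_id] = {node_id}
--         else:
--             replicas = master_replicas[master_id]
--             replicas.add(node_id)
--     return master_replicas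
-- ===== SOURCE B (Python) =====
-- def _get_master_replicas(master_nodes, slave_nodes):
--     # Stage 1: flatten the slaves to (node_id, master_id) pairs with a valid master_id.
--     valid = [(node_id, info.get("master_id")) for node_id, info in slave_nodes.items()]
--     valid = [(n, m) for n, m in valid if m and m != "-"]
--     # Stage 2: key order = all masters, then unknown master_ids by first appearance.
--     keys = list(master_nodes)
--     seen = set(keys)
--     for _, m in valid:
--         if m not in seen:
--             seen.add(m)
--             keys.append(m)
--     # Stage 3: one comprehension builds the whole result, scanning valid per key.
--     return {k: {n for n, m in valid if m == k} for k in keys}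
-- ===== Notes on version B (the rewrite author's own statement) =====
-- stated objective: alternative
-- what changed: A builds the answer in one accumulation pass over the slaves, growing a dict of sets with an in/not-in branch; B never accumulates sets during a pass: it first flattens the slaves to (node_id, master_id) pairs, then computes the final key order (masters, then unknown master_ids by first appearance), and finally builds every value with an independent per-key scan of the flattened pairs.
import Mathlib
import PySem

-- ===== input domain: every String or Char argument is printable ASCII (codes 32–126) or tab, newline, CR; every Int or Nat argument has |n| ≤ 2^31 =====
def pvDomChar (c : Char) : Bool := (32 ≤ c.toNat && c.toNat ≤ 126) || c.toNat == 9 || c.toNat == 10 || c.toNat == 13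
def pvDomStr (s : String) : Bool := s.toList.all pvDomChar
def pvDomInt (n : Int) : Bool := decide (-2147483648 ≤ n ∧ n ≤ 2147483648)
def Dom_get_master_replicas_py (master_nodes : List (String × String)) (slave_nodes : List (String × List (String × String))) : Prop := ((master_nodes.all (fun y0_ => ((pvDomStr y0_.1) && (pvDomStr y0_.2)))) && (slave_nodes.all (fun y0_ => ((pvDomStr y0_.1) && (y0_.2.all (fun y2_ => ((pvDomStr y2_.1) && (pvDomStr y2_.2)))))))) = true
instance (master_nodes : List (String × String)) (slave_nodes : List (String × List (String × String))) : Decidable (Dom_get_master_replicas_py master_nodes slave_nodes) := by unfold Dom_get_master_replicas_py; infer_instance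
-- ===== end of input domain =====

-- B replaces A's single dict-of-sets accumulation pass by three independent stages: flatten the
-- slaves to (node_id, master_id) pairs, compute the final key order, then build each value by
-- an independent per-key scan of the flattened pairs; objective: alternative decomposition.

-- ===== PORT A =====
def get_master_replicas_py (master_nodes : List (String × String)) (slave_nodes : List (String × List (String × String))) : List (String × List String) :=
  -- master_replicas = {}; for node_id in master_nodes: master_replicas[node_id] = set()
  let master_replicas : PySem.Dict String (PySem.Set String) :=
    master_nodes.foldl (fun d p => d.insert p.1 PySem.Set.empty) PySem.Dict.empty
  -- if not slave_nodes: return master_replicas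
  if slave_nodes.isEmpty then master_replicas.items
  else
    -- for node_id, node_info in slave_nodes.items(): …
    (slave_nodes.foldl (fun d p =>
        match (PySem.Dict.mk p.2).get? "master_id" with
        | none => d            -- master_id is None → `not master_id` → continue
        | some master_id =>
          if master_id = "" ∨ master_id = "-" then d   -- continue
          else if d.contains master_id = false then
            d.insert master_id (PySem.Set.ofList [p.1])          -- master_replicas[master_id] = {node_id}
          else
            -- replicas = master_replicas[master_id]; replicas.add(node_id)  (in-place: position kept)
            d.insert master_id (PySem.Set.add (d.getD master_id PySem.Set.empty) p.1))
      master_replicas).items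

-- ===== PORT B =====
def get_master_replicas_py_alt (master_nodes : List (String × String)) (slave_nodes : List (String × List (String × String))) : List (String × List String) :=
  -- valid = [(node_id, info.get("master_id")) for …]; valid = [(n, m) for n, m in valid if m and m != "-"]
  let valid : List (String × String) :=
    slave_nodes.filterMap (fun p =>
      match (PySem.Dict.mk p.2).get? "master_id" with
      | none => none
      | some m => if m ≠ "" ∧ m ≠ "-" then some (p.1, m) else none)
  -- keys = list(master_nodes); seen = set(keys)
  let ks0 : List String := master_nodes.map (·.1)
  -- for _, m in valid: if m not in seen: seen.add(m); keys.append(m)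
  let ksSeen : List String × PySem.Set String :=
    valid.foldl (fun st q => if q.2 ∈ st.2 then st else (st.1 ++ [q.2], PySem.Set.add st.2 q.2))
      (ks0, PySem.Set.ofList ks0)
  -- return {k: {n for n, m in valid if m == k} for k in keys}
  (ksSeen.1.foldl (fun (r : PySem.Dict String (PySem.Set String)) k =>
      r.insert k (PySem.Set.ofList ((valid.filter (fun q => q.2 == k)).map (·.1)))) PySem.Dict.empty).items

-- ===== PRECONDITION & SPEC =====
def Spec_get_master_replicas_py (master_nodes : List (String × String)) (slave_nodes : List (String × List (String × String))) (out : List (String × List String)) : Prop := out = get_master_replicas_py_alt master_nodes slave_nodes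
instance (master_nodes : List (String × String)) (slave_nodes : List (String × List (String × String))) (out : List (String × List String)) : Decidable (Spec_get_master_replicas_py master_nodes slave_nodes out) := by unfold Spec_get_master_replicas_py; infer_instance

-- ===== CLAIM (what is proved, stated in full; the proofs are below) =====
def Claim_equal_get_master_replicas_py : Prop := ∀ (master_nodes : List (String × String)) (slave_nodes : List (String × List (String × String))), Dom_get_master_replicas_py master_nodes slave_nodes → Spec_get_master_replicas_py master_nodes slave_nodes (get_master_replicas_py master_nodes slave_nodes)

-- ===== LEMMAS AND PROOFS =====

-- Named copies of the ports' pieces (definitionally equal to them).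
def pvAstep (d : PySem.Dict String (PySem.Set String)) (p : String × List (String × String)) : PySem.Dict String (PySem.Set String) :=
  match (PySem.Dict.mk p.2).get? "master_id" with
  | none => d
  | some master_id =>
    if master_id = "" ∨ master_id = "-" then d
    else if d.contains master_id = false then
      d.insert master_id (PySem.Set.ofList [p.1])
    else
      d.insert master_id (PySem.Set.add (d.getD master_id PySem.Set.empty) p.1)

-- A's loop body with the membership branch collapsed away (extensionally equal to pvAstep).
def pvNstep (g : PySem.Dict String (PySem.Set String)) (p : String × List (String × String)) : PySem.Dict String (PySem.Set String) :=
  match (PySem.Dict.mk p.2).get? "master_id" with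
  | none => g
  | some master_id =>
    if master_id ≠ "" ∧ master_id ≠ "-" then
      g.insert master_id (PySem.Set.add (g.getD master_id PySem.Set.empty) p.1)
    else g

-- the "valid master_id" of a slave entry
def pvMid (info : List (String × String)) : Option String :=
  match (PySem.Dict.mk info).get? "master_id" with
  | none => none
  | some m => if m ≠ "" ∧ m ≠ "-" then some m else none

def pvInit (master_nodes : List (String × String)) : PySem.Dict String (PySem.Set String) :=
  master_nodes.foldl (fun d p => d.insert p.1 PySem.Set.empty) PySem.Dict.empty

def pvValid (slave_nodes : List (String × List (String × String))) : List (String × String) :=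
  slave_nodes.filterMap (fun p => (pvMid p.2).map (fun m => (p.1, m)))

-- the list of keys B appends after the masters
def pvNews : List (String × String) → PySem.Set String → List String
  | [], _ => []
  | q :: rest, seen =>
    if q.2 ∈ seen then pvNews rest seen else q.2 :: pvNews rest (PySem.Set.add seen q.2)

-- The two loop bodies of A's normalisation are extensionally the same dictionary transformer.
theorem pvStep_eq (d : PySem.Dict String (PySem.Set String)) (p : String × List (String × String)) :
    pvAstep d p = pvNstep d p := by
  unfold pvAstep pvNstep
  cases h : (PySem.Dict.mk p.2).get? "master_id" with
  | none => rfl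
  | some m =>
    show (if m = "" ∨ m = "-" then d
          else if d.contains m = false then d.insert m (PySem.Set.ofList [p.1])
          else d.insert m (PySem.Set.add (d.getD m PySem.Set.empty) p.1))
        = (if m ≠ "" ∧ m ≠ "-" then d.insert m (PySem.Set.add (d.getD m PySem.Set.empty) p.1) else d)
    by_cases h1 : m = "" ∨ m = "-"
    · rw [if_pos h1, if_neg (show ¬(m ≠ "" ∧ m ≠ "-") by tauto)]
    · rw [if_neg h1, if_pos (show m ≠ "" ∧ m ≠ "-" by tauto)]
      by_cases hc : d.contains m = false
      · rw [if_pos hc, PySem.Dict.getD_of_not_contains d _ hc]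
        rfl
      · rw [if_neg hc]

theorem pvNstep_mid_none (g : PySem.Dict String (PySem.Set String)) (p : String × List (String × String)) (h : pvMid p.2 = none) : pvNstep g p = g := by
  unfold pvNstep
  unfold pvMid at h
  cases hm : (PySem.Dict.mk p.2).get? "master_id" with
  | none => rfl
  | some m =>
    rw [hm] at h
    replace h : (if m ≠ "" ∧ m ≠ "-" then some m else none) = none := h
    by_cases h1 : m ≠ "" ∧ m ≠ "-"
    · rw [if_pos h1] at h; exact absurd h (by simp)
    · show (if m ≠ "" ∧ m ≠ "-" then g.insert m (PySem.Set.add (g.getD m PySem.Set.empty) p.1) else g) = g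
      rw [if_neg h1]

theorem pvNstep_mid_some (g : PySem.Dict String (PySem.Set String)) (p : String × List (String × String)) (m : String) (h : pvMid p.2 = some m) :
    pvNstep g p = g.insert m (PySem.Set.add (g.getD m PySem.Set.empty) p.1) := by
  unfold pvNstep
  unfold pvMid at h
  cases hm : (PySem.Dict.mk p.2).get? "master_id" with
  | none => rw [hm] at h; exact absurd h (by simp)
  | some m' =>
    rw [hm] at h
    replace h : (if m' ≠ "" ∧ m' ≠ "-" then some m' else none) = some m := h
    show (if m' ≠ "" ∧ m' ≠ "-" then g.insert m' (PySem.Set.add (g.getD m' PySem.Set.empty) p.1) else g) = _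
    by_cases h1 : m' ≠ "" ∧ m' ≠ "-"
    · rw [if_pos h1] at h
      cases h
      rw [if_pos h1]
    · rw [if_neg h1] at h; exact absurd h (by simp)

-- Set helpers
theorem pvSet_add_of_mem {s : PySem.Set String} {x : String} (h : x ∈ s) : PySem.Set.add s x = s := by
  simp [PySem.Set.add, PySem.Set.contains, h]

theorem pvSet_add_of_not_mem {s : PySem.Set String} {x : String} (h : ¬ x ∈ s) : PySem.Set.add s x = s ++ [x] := by
  simp [PySem.Set.add, PySem.Set.contains, h]

theorem pvSet_update_cons (S : PySem.Set String) (x : String) (l : List String) :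
    PySem.Set.update S (x :: l) = PySem.Set.update (PySem.Set.add S x) l := rfl

theorem pvSet_mem_update (S : PySem.Set String) (l : List String) (x : String) :
    x ∈ PySem.Set.update S l ↔ x ∈ S ∨ x ∈ l := by
  induction l generalizing S with
  | nil => simp [PySem.Set.update]
  | cons a l ih =>
    rw [pvSet_update_cons, ih, PySem.Set.mem_add]
    simp [or_assoc, or_comm, or_left_comm]

theorem pvSet_update_append (S : PySem.Set String) (l l' : List String) :
    PySem.Set.update S (l ++ l') = PySem.Set.update (PySem.Set.update S l) l' :=
  List.foldl_append

-- B's valid list is the filterMap of pvMid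
theorem pvValid_eq (sn : List (String × List (String × String))) :
    (sn.filterMap (fun p =>
      match (PySem.Dict.mk p.2).get? "master_id" with
      | none => none
      | some m => if m ≠ "" ∧ m ≠ "-" then some (p.1, m) else none)) = pvValid sn := by
  unfold pvValid
  apply List.filterMap_congr
  intro p _
  unfold pvMid
  cases (PySem.Dict.mk p.2).get? "master_id" with
  | none => rfl
  | some m =>
    by_cases h : m ≠ "" ∧ m ≠ "-" <;> simp [h]

-- the master_ids of the valid list
theorem pvValid_map_snd (sn : List (String × List (String × String))) :
    (pvValid sn).map (·.2) = sn.filterMap (fun p => pvMid p.2) := by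
  induction sn with
  | nil => rfl
  | cons p sn ih =>
    unfold pvValid
    rw [List.filterMap_cons, List.filterMap_cons]
    cases h : pvMid p.2 with
    | none => simpa [pvValid] using ih
    | some m => simpa [pvValid] using ih

-- the node_ids with a given master_id, read off the valid list or off the slaves directly
theorem pvValid_filter (sn : List (String × List (String × String))) (k : String) :
    ((pvValid sn).filter (fun q => q.2 == k)).map (·.1) =
      (sn.filter (fun p => pvMid p.2 == some k)).map (·.1) := by
  induction sn with
  | nil => rfl
  | cons p sn ih =>
    unfold pvValid
    rw [List.filterMap_cons, List.filter_cons]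
    cases h : pvMid p.2 with
    | none =>
      simpa [pvValid, h] using ih
    | some m =>
      simp only [Option.map_some]
      by_cases hk : m = k
      · subst hk
        simpa [pvValid, h] using ih
      · simpa [pvValid, h, hk] using ih

-- the key/seen fold produces ks ++ pvNews valid seen
theorem pvKsFold (valid : List (String × String)) (ks : List String) (seen : PySem.Set String) :
    (valid.foldl (fun st q => if q.2 ∈ st.2 then st else (st.1 ++ [q.2], PySem.Set.add st.2 q.2))
      (ks, seen)).1 = ks ++ pvNews valid seen := by
  induction valid generalizing ks seen with
  | nil => simp [pvNews]
  | cons q rest ih =>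
    rw [List.foldl_cons]
    by_cases h : q.2 ∈ seen
    · rw [if_pos h]
      unfold pvNews
      rw [if_pos h, ih]
    · rw [if_neg h]
      unfold pvNews
      rw [if_neg h, ih]
      simp

-- updating with the new keys is the same as updating with all master_ids
theorem pvUpdate_news (valid : List (String × String)) (S seen : PySem.Set String)
    (hS : ∀ x, x ∈ seen ↔ x ∈ S) :
    PySem.Set.update S (pvNews valid seen) = PySem.Set.update S (valid.map (·.2)) := by
  induction valid generalizing S seen with
  | nil => rfl
  | cons q rest ih =>
    rw [List.map_cons, pvSet_update_cons]
    by_cases h : q.2 ∈ seen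
    · unfold pvNews
      rw [if_pos h, pvSet_add_of_mem ((hS q.2).mp h), ih S seen hS]
    · unfold pvNews
      rw [if_neg h, pvSet_update_cons]
      exact ih (PySem.Set.add S q.2) (PySem.Set.add seen q.2)
        (fun x => by rw [PySem.Set.mem_add, PySem.Set.mem_add, hS x])

-- keys of A's normalized loop
theorem pvKeys_Nfold (l : List (String × List (String × String))) (d : PySem.Dict String (PySem.Set String)) :
    (l.foldl pvNstep d).keys = PySem.Set.update d.keys (l.filterMap (fun p => pvMid p.2)) := by
  induction l generalizing d with
  | nil => rfl
  | cons p l ih =>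
    rw [List.foldl_cons, List.filterMap_cons]
    cases h : pvMid p.2 with
    | none => rw [pvNstep_mid_none d p h]; exact ih d
    | some m =>
      rw [pvNstep_mid_some d p m h, ih, pvSet_update_cons]
      congr 1
      by_cases hc : d.contains m = true
      · rw [PySem.Dict.keys_insert_of_contains d _ hc,
            pvSet_add_of_mem ((PySem.Dict.contains_iff_mem_keys d m).mp hc)]
      · have h' : d.contains m = false := by simpa using hc
        rw [PySem.Dict.keys_insert_of_not_contains d _ h']
        have hm : ¬ m ∈ d.keys := fun hmem => hc ((PySem.Dict.contains_iff_mem_keys d m).mpr hmem)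
        rw [pvSet_add_of_not_mem hm]

theorem pvNodup_Nfold (l : List (String × List (String × String))) (d : PySem.Dict String (PySem.Set String))
    (hd : d.keys.Nodup) : (l.foldl pvNstep d).keys.Nodup := by
  induction l generalizing d with
  | nil => exact hd
  | cons p l ih =>
    rw [List.foldl_cons]
    cases h : pvMid p.2 with
    | none => rw [pvNstep_mid_none d p h]; exact ih d hd
    | some m => rw [pvNstep_mid_some d p m h]; exact ih _ (PySem.Dict.nodup_keys_insert d m _ hd)

-- values of A's normalized loop
theorem pvGetD_Nfold (l : List (String × List (String × String))) (d : PySem.Dict String (PySem.Set String)) (k : String) :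
    (l.foldl pvNstep d).getD k PySem.Set.empty =
      ((l.filter (fun p => pvMid p.2 == some k)).map (·.1)).foldl PySem.Set.add (d.getD k PySem.Set.empty) := by
  induction l generalizing d with
  | nil => rfl
  | cons p l ih =>
    rw [List.foldl_cons, List.filter_cons]
    cases h : pvMid p.2 with
    | none =>
      rw [pvNstep_mid_none d p h, ih]
      simp
    | some m =>
      rw [pvNstep_mid_some d p m h, ih]
      by_cases hk : m = k
      · subst hk
        simp [PySem.Dict.getD_insert_self]
      · have hb : ((some m : Option String) == some k) = false := by simp [hk]
        rw [hb]
        simp only [Bool.false_eq_true, if_false]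
        rw [PySem.Dict.getD_insert, if_neg (fun hh => hk hh.symm)]

-- values of a fold of inserts over a key list whose value depends only on the key
theorem pvGetD_insertk (F : String → PySem.Set String) (ks : List String) (r : PySem.Dict String (PySem.Set String)) (k : String) :
    (ks.foldl (fun r k' => r.insert k' (F k')) r).getD k PySem.Set.empty =
      if k ∈ ks then F k else r.getD k PySem.Set.empty := by
  induction ks generalizing r with
  | nil => simp
  | cons a ks ih =>
    rw [List.foldl_cons, ih]
    by_cases hm : k ∈ ks
    · simp [hm]
    · by_cases hk : k = a
      · subst hk; simp [hm, PySem.Dict.getD_insert_self]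
      · rw [if_neg hm, PySem.Dict.getD_insert, if_neg hk]
        simp [hm, hk]

-- characterisations of A's seed dictionary
theorem pvInit_keys (mn : List (String × String)) :
    (pvInit mn).keys = PySem.Set.update [] (mn.map (fun p => p.1)) :=
  PySem.Dict.keys_foldl_insert_key (ν := PySem.Set String) mn (fun p => p.1) (fun _ _ => PySem.Set.empty) PySem.Dict.empty

theorem pvInit_nodup (mn : List (String × String)) : (pvInit mn).keys.Nodup :=
  PySem.Dict.nodup_keys_foldl_insert_key (ν := PySem.Set String) mn (fun p => p.1) (fun _ _ => PySem.Set.empty) PySem.Dict.empty (by simp)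

theorem pvGetD_insertf (F : String → PySem.Set String) (l : List (String × String)) (r : PySem.Dict String (PySem.Set String)) (k : String) :
    (l.foldl (fun r p => r.insert p.1 (F p.1)) r).getD k PySem.Set.empty =
      if k ∈ l.map (·.1) then F k else r.getD k PySem.Set.empty := by
  induction l generalizing r with
  | nil => simp
  | cons p l ih =>
    rw [List.foldl_cons, ih, List.map_cons]
    by_cases hm : k ∈ l.map (·.1)
    · simp [hm]
    · by_cases hk : k = p.1
      · subst hk; simp [hm, PySem.Dict.getD_insert_self]
      · rw [if_neg hm, PySem.Dict.getD_insert, if_neg hk]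
        simp [hm, hk]

theorem pvInit_getD (mn : List (String × String)) (k : String) :
    (pvInit mn).getD k PySem.Set.empty = PySem.Set.empty := by
  have h : (pvInit mn).getD k PySem.Set.empty =
      if k ∈ mn.map (·.1) then PySem.Set.empty
      else (PySem.Dict.empty : PySem.Dict String (PySem.Set String)).getD k PySem.Set.empty :=
    pvGetD_insertf (fun _ => PySem.Set.empty) mn PySem.Dict.empty k
  rw [h]
  split <;> simp [PySem.Dict.getD_empty]

-- the main equivalence
theorem pvMain (master_nodes : List (String × String)) (slave_nodes : List (String × List (String × String))) :
    get_master_replicas_py master_nodes slave_nodes = get_master_replicas_py_alt master_nodes slave_nodes := by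
  have hstep : pvAstep = pvNstep := funext fun d => funext fun p => pvStep_eq d p
  -- A, normalized
  have hA : get_master_replicas_py master_nodes slave_nodes =
      (slave_nodes.foldl pvNstep (pvInit master_nodes)).items := by
    cases slave_nodes with
    | nil => rfl
    | cons s l =>
      show (List.foldl pvAstep (pvInit master_nodes) (s :: l)).items = _
      rw [hstep]
  -- B, normalized: a fold of inserts over the explicit key list
  have hB : get_master_replicas_py_alt master_nodes slave_nodes =
      (((master_nodes.map (·.1)) ++ pvNews (pvValid slave_nodes) (PySem.Set.ofList (master_nodes.map (·.1)))).foldl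
        (fun r k => r.insert k (PySem.Set.ofList (((pvValid slave_nodes).filter (fun q => q.2 == k)).map (·.1))))
        PySem.Dict.empty).items := by
    simp only [get_master_replicas_py_alt, pvValid_eq, pvKsFold]
  rw [hA, hB]
  have hnodupA : (slave_nodes.foldl pvNstep (pvInit master_nodes)).keys.Nodup :=
    pvNodup_Nfold _ _ (pvInit_nodup master_nodes)
  have hnodupB : (((master_nodes.map (·.1)) ++ pvNews (pvValid slave_nodes) (PySem.Set.ofList (master_nodes.map (·.1)))).foldl
        (fun r k => r.insert k (PySem.Set.ofList (((pvValid slave_nodes).filter (fun q => q.2 == k)).map (·.1))))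
        PySem.Dict.empty).keys.Nodup :=
    PySem.Dict.nodup_keys_foldl_insert_key _ (fun k => k) _ PySem.Dict.empty (by simp)
  have hkeysB : (((master_nodes.map (·.1)) ++ pvNews (pvValid slave_nodes) (PySem.Set.ofList (master_nodes.map (·.1)))).foldl
        (fun r k => r.insert k (PySem.Set.ofList (((pvValid slave_nodes).filter (fun q => q.2 == k)).map (·.1))))
        PySem.Dict.empty).keys =
      PySem.Set.update [] ((master_nodes.map (·.1)) ++ pvNews (pvValid slave_nodes) (PySem.Set.ofList (master_nodes.map (·.1)))) := by
    have h := PySem.Dict.keys_foldl_insert_key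
      ((master_nodes.map (·.1)) ++ pvNews (pvValid slave_nodes) (PySem.Set.ofList (master_nodes.map (·.1))))
      (fun k => k)
      (fun _ k => PySem.Set.ofList (((pvValid slave_nodes).filter (fun q => q.2 == k)).map (·.1)))
      PySem.Dict.empty
    simpa using h
  have keys_eq : (slave_nodes.foldl pvNstep (pvInit master_nodes)).keys =
      (((master_nodes.map (·.1)) ++ pvNews (pvValid slave_nodes) (PySem.Set.ofList (master_nodes.map (·.1)))).foldl
        (fun r k => r.insert k (PySem.Set.ofList (((pvValid slave_nodes).filter (fun q => q.2 == k)).map (·.1))))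
        PySem.Dict.empty).keys := by
    rw [pvKeys_Nfold, pvInit_keys, hkeysB, pvSet_update_append,
        pvUpdate_news (pvValid slave_nodes) (PySem.Set.update [] (master_nodes.map (·.1)))
          (PySem.Set.ofList (master_nodes.map (·.1)))
          (fun x => by rw [PySem.Set.mem_ofList, pvSet_mem_update]; simp),
        pvValid_map_snd]
  have getD_eq : ∀ k, k ∈ (((master_nodes.map (·.1)) ++ pvNews (pvValid slave_nodes) (PySem.Set.ofList (master_nodes.map (·.1)))).foldl
        (fun r k => r.insert k (PySem.Set.ofList (((pvValid slave_nodes).filter (fun q => q.2 == k)).map (·.1))))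
        PySem.Dict.empty).keys →
      (slave_nodes.foldl pvNstep (pvInit master_nodes)).getD k PySem.Set.empty =
      (((master_nodes.map (·.1)) ++ pvNews (pvValid slave_nodes) (PySem.Set.ofList (master_nodes.map (·.1)))).foldl
        (fun r k => r.insert k (PySem.Set.ofList (((pvValid slave_nodes).filter (fun q => q.2 == k)).map (·.1))))
        PySem.Dict.empty).getD k PySem.Set.empty := by
    intro k hk
    have hkmem : k ∈ (master_nodes.map (·.1)) ++ pvNews (pvValid slave_nodes) (PySem.Set.ofList (master_nodes.map (·.1))) := by
      rw [hkeysB] at hk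
      rcases (pvSet_mem_update [] _ k).mp hk with hh | hh
      · cases hh
      · exact hh
    rw [pvGetD_Nfold, pvInit_getD,
        pvGetD_insertk (fun k => PySem.Set.ofList (((pvValid slave_nodes).filter (fun q => q.2 == k)).map (·.1))) _ PySem.Dict.empty k,
        if_pos hkmem, PySem.Set.ofList_eq_foldl, pvValid_filter]
    rfl
  apply congrArg PySem.Dict.items
  apply PySem.Dict.ext
  rw [PySem.Dict.items_eq_map_keys _ hnodupA PySem.Set.empty,
      PySem.Dict.items_eq_map_keys _ hnodupB PySem.Set.empty,
      keys_eq]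
  exact List.map_congr_left (fun k hkmem => by rw [getD_eq k hkmem])

-- ===== VERDICT (by name: the statement is the Claim_ definition above) =====
theorem get_master_replicas_py_spec : Claim_equal_get_master_replicas_py := by
  intro master_nodes slave_nodes _
  unfold Spec_get_master_replicas_py
  exact pvMain master_nodes slave_nodes
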